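-- pv_equiv track=rewrite | github.com/daniel-reich/ubiquitous-fiesta | 6o5wkfmSaFXCJYqDx_18.py | abcmath
-- ===== SOURCE A (Python) =====
-- def abcmath(a, b, c):
--   result=a
--   i=1
--   while i <= b:
--     result+=result
--     i+=1
--   result=result%c
--   if result == 0 :
--     return True
--   else:
--     return False
-- ===== SOURCE B (Python) =====
-- def abcmath(a, b, c):
--   # modular exponentiation instead of b repeated doublings
--   return a * pow(2, max(b, 0), c) % c == 0
-- ===== Notes on version B (the rewrite author's own statement) =====
-- stated objective: faster
-- what changed: Replaced the O(b) doubling loop with a single modular exponentiation pow(2, max(b,0), c), testing divisibility directly.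
import Mathlib
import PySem

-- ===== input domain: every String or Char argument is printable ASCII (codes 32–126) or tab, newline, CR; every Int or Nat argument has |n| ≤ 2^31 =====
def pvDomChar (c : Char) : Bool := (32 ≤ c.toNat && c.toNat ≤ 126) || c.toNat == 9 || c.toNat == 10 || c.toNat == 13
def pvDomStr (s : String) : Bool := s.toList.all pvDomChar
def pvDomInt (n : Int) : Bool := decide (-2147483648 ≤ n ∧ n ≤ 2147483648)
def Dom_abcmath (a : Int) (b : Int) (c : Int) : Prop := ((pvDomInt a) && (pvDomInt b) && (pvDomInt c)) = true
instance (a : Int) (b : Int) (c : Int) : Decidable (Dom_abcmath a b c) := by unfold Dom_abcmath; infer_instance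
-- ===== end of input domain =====

-- B replaces A's O(b) doubling loop by one modular exponentiation (pow(2, max(b,0), c)); objective: faster.


-- ===== PORT A =====
-- while i <= b: result += result; i += 1
def abcmathLoop (b : Int) (i : Int) (result : Int) : Int :=
  if i ≤ b then abcmathLoop b (i + 1) (result + result) else result
termination_by (b + 1 - i).toNat
decreasing_by omega

def abcmath (a : Int) (b : Int) (c : Int) : Bool :=
  let result := a
  let result := abcmathLoop b 1 result
  let result := PySem.Int.mod result c
  if result = 0 then true else false

-- ===== PORT B =====
def abcmath_alt (a : Int) (b : Int) (c : Int) : Bool :=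
  PySem.Int.mod (a * PySem.Int.powMod 2 (max b 0).toNat c) c == 0

-- ===== PRECONDITION & SPEC =====
-- Pre_ excludes exactly c = 0, where Python A raises ZeroDivisionError (B raises ValueError there too).
def Pre_abcmath (a : Int) (b : Int) (c : Int) : Prop := c ≠ 0
instance (a : Int) (b : Int) (c : Int) : Decidable (Pre_abcmath a b c) := by unfold Pre_abcmath; infer_instance
def pvWitness_abcmath : Int × Int × Int := (3, 4, 6)

def Spec_abcmath (a : Int) (b : Int) (c : Int) (out : Bool) : Prop := out = abcmath_alt a b c
instance (a : Int) (b : Int) (c : Int) (out : Bool) : Decidable (Spec_abcmath a b c out) := by unfold Spec_abcmath; infer_instance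

-- ===== CLAIM (what is proved, stated in full; the proofs are below) =====
def Claim_equal_abcmath : Prop := ∀ (a : Int) (b : Int) (c : Int), Dom_abcmath a b c → Pre_abcmath a b c → Spec_abcmath a b c (abcmath a b c)

-- ===== LEMMAS AND PROOFS =====

-- the loop doubles `result` once per i ∈ [i, b]
theorem abcmathLoop_eq (b i result : Int) :
    abcmathLoop b i result = result * 2 ^ (b + 1 - i).toNat := by
  by_cases h : i ≤ b
  · rw [abcmathLoop, if_pos h, abcmathLoop_eq b (i + 1) (result + result)]
    have he : (b + 1 - i).toNat = (b + 1 - (i + 1)).toNat + 1 := by omega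
    rw [he, pow_succ]
    ring
  · rw [abcmathLoop, if_neg h]
    have : (b + 1 - i).toNat = 0 := by omega
    simp [this]
termination_by (b + 1 - i).toNat
decreasing_by omega

-- reducing the base mod c first does not change divisibility by c
theorem mod_mul_mod_eq_zero_iff (a x c : Int) :
    PySem.Int.mod (a * PySem.Int.mod x c) c = 0 ↔ PySem.Int.mod (a * x) c = 0 := by
  rw [PySem.Int.mod_eq_zero_iff_dvd, PySem.Int.mod_eq_zero_iff_dvd]
  have key : a * x - a * PySem.Int.mod x c = c * (a * PySem.Int.floordiv x c) := by
    linear_combination (-a) * (PySem.Int.floordiv_mul_add_mod x c)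
  constructor
  · intro h
    have he : a * x = a * PySem.Int.mod x c + c * (a * PySem.Int.floordiv x c) := by linarith
    rw [he]
    exact dvd_add h ⟨_, rfl⟩
  · intro h
    have he : a * PySem.Int.mod x c = a * x - c * (a * PySem.Int.floordiv x c) := by linarith
    rw [he]
    exact dvd_sub h ⟨_, rfl⟩

-- ===== VERDICT (by name: the statement is the Claim_ definition above) =====
theorem abcmath_spec : Claim_equal_abcmath := by
  intro a b c _ _
  unfold Spec_abcmath abcmath abcmath_alt PySem.Int.powMod
  show (if PySem.Int.mod (abcmathLoop b 1 a) c = 0 then true else false)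
      = (PySem.Int.mod (a * PySem.Int.mod (2 ^ (max b 0).toNat) c) c == 0)
  rw [abcmathLoop_eq]
  have he : (b + 1 - 1).toNat = (max b 0).toNat := by omega
  rw [he]
  have hiff := mod_mul_mod_eq_zero_iff a (2 ^ (max b 0).toNat) c
  by_cases h : PySem.Int.mod (a * 2 ^ (max b 0).toNat) c = 0
  · simp [h, hiff.mpr h]
  · have h2 : PySem.Int.mod (a * PySem.Int.mod (2 ^ (max b 0).toNat) c) c ≠ 0 :=
      fun hh => h (hiff.mp hh)
    simp [h, h2]
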